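-- pv_equiv track=rewrite | github.com/dannybd/dice-monte-carlo | run.py | ev_coeffs
-- ===== SOURCE A (Python) =====
-- from collections import Counter
-- from itertools import product
--
-- def ev_outcomes(d_what, fixed):
--     prefix = list(range(1, fixed + 1))
--     return [
--         prefix + list(c) for c in product(range(1, d_what + 1), repeat=d_what - fixed)
--     ]
--
-- def ev_coeffs(d_what, fixed):
--     coeffs = dict.fromkeys(range(d_what + 1), 0)
--     coeffs.update(
--         Counter(
--             [
--                 len({n: v for (n, v) in Counter(x).items() if v == 1})
--                 for x in ev_outcomes(d_what=d_what, fixed=fixed)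
--             ]
--         )
--     )
--     return list(coeffs.values())
-- ===== SOURCE B (Python) =====
-- def ev_coeffs(d_what, fixed):
--     # Dynamic programming over value-occupancy categories instead of enumerating
--     # all d_what**(d_what-fixed) outcomes.  State after some dice: a0 = prefix
--     # values not yet hit by a free die, b0 / b1 = non-prefix values hit zero /
--     # exactly one time.  layer[a0][b0][b1] is the histogram (over the final
--     # singleton count 0..d_what) of the number of free-dice sequences of the
--     # remaining length that lead from that state to each final count.
--     p = max(fixed, 0)
--     q = d_what - p
--     r = d_what - fixed
--     n = d_what + 1
--     layer = [[[[1 if k == a0 + b1 else 0 for k in range(n)]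
--                for b1 in range(q + 1)]
--               for b0 in range(q + 1)]
--              for a0 in range(p + 1)]
--     for _ in range(r):
--         prev = layer
--         layer = [[[[a0 * (prev[a0 - 1][b0][b1][k] if a0 > 0 else 0)
--                     + b0 * (prev[a0][b0 - 1][b1 + 1][k] if b0 > 0 and b1 < q else 0)
--                     + b1 * (prev[a0][b0][b1 - 1][k] if b1 > 0 else 0)
--                     + (p - a0 + q - b0 - b1) * prev[a0][b0][b1][k]
--                     for k in range(n)]
--                    for b1 in range(q + 1)]
--                   for b0 in range(q + 1)]
--                  for a0 in range(p + 1)]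
--     return layer[p][q][0]
-- ===== Notes on version B (the rewrite author's own statement) =====
-- stated objective: faster
-- what changed: A enumerates every one of d_what**(d_what-fixed) outcomes and runs a Counter over each; B never builds an outcome: it does a dynamic program over occupancy-category counts (prefix values still unseen, free values seen zero times / exactly once), advancing a histogram table one die at a time.
-- outside the precondition, e.g. on ev_coeffs(-2, -3): A returns [], B raises IndexError
import Mathlib
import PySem

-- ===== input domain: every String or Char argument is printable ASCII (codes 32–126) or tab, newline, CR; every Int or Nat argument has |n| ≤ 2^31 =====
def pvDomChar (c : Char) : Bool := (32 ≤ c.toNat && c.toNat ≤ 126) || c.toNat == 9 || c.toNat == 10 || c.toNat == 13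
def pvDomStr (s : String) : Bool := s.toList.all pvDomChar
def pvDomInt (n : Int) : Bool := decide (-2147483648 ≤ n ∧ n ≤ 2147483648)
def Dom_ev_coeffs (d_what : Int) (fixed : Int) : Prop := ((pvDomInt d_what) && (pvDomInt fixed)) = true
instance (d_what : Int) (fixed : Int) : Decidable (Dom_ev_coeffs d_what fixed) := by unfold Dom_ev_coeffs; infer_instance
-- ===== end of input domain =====

-- B replaces A's enumeration of all d^(d-fixed) outcomes by a polynomial-time dynamic
-- program over value-occupancy categories (objective: faster, asymptotically).

-- ===== PORT A =====

-- itertools.product(vals, repeat=n) (leftmost factor varies slowest)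
def pvProdPow (vals : List Int) : Nat → List (List Int)
  | 0 => [[]]
  | n + 1 => vals.flatMap (fun x => (pvProdPow vals n).map (fun t => x :: t))

-- A raises ValueError when d_what - fixed < 0 (negative 'repeat'); such inputs are
-- outside Pre_ev_coeffs, so the .toNat clamp is never relied on.
def ev_outcomes (d_what : Int) (fixed : Int) : List (List Int) :=
  let pfx := PySem.List.pyRange 1 (fixed + 1) 1
  (pvProdPow (PySem.List.pyRange 1 (d_what + 1) 1) (d_what - fixed).toNat).map
    (fun c => pfx ++ c)

-- len({n: v for (n, v) in Counter(x).items() if v == 1})  (dict built from the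
-- filtered items, then its length)
def pvSingles (x : List Int) : Int :=
  ((((PySem.Dict.counter x).items.filter (fun nv => nv.2 == 1)).foldl
      (fun (d : PySem.Dict Int Int) nv => d.insert nv.1 nv.2) PySem.Dict.empty).size : Int)

def ev_coeffs (d_what : Int) (fixed : Int) : List Int :=
  let coeffs0 := (PySem.List.pyRange 0 (d_what + 1) 1).foldl
      (fun (d : PySem.Dict Int Int) k => d.insert k 0) PySem.Dict.empty
  let cnts := (ev_outcomes d_what fixed).map pvSingles
  let coeffs := (PySem.Dict.counter cnts).items.foldl
      (fun (d : PySem.Dict Int Int) kv => d.insert kv.1 kv.2) coeffs0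
  coeffs.values

-- ===== PORT B =====

-- prev[a0][b0][b1][k] (all indices produced in range by Source B's guards)
def pvG (prev : List (List (List (List Int)))) (a0 b0 b1 k : Int) : Int :=
  PySem.List.pyGetD
    (PySem.List.pyGetD (PySem.List.pyGetD (PySem.List.pyGetD prev a0 []) b0 []) b1 []) k 0

def pvLayer0 (p q n : Int) : List (List (List (List Int))) :=
  (PySem.List.pyRange 0 (p + 1) 1).map fun a0 =>
    (PySem.List.pyRange 0 (q + 1) 1).map fun _b0 =>
      (PySem.List.pyRange 0 (q + 1) 1).map fun b1 =>
        (PySem.List.pyRange 0 n 1).map fun k => if k == a0 + b1 then (1 : Int) else 0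

def pvStep (p q n : Int) (prev : List (List (List (List Int)))) :
    List (List (List (List Int))) :=
  (PySem.List.pyRange 0 (p + 1) 1).map fun a0 =>
    (PySem.List.pyRange 0 (q + 1) 1).map fun b0 =>
      (PySem.List.pyRange 0 (q + 1) 1).map fun b1 =>
        (PySem.List.pyRange 0 n 1).map fun k =>
          a0 * (if 0 < a0 then pvG prev (a0 - 1) b0 b1 k else 0)
          + b0 * (if 0 < b0 ∧ b1 < q then pvG prev a0 (b0 - 1) (b1 + 1) k else 0)
          + b1 * (if 0 < b1 then pvG prev a0 b0 (b1 - 1) k else 0)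
          + (p - a0 + q - b0 - b1) * pvG prev a0 b0 b1 k

def ev_coeffs_alt (d_what : Int) (fixed : Int) : List Int :=
  let p := max fixed 0
  let q := d_what - p
  let r := d_what - fixed
  let n := d_what + 1
  let final := (PySem.List.pyRange 0 r 1).foldl
      (fun prev _ => pvStep p q n prev) (pvLayer0 p q n)
  PySem.List.pyGetD (PySem.List.pyGetD (PySem.List.pyGetD final p []) q []) 0 []

-- ===== PRECONDITION & SPEC =====
-- Pre_ excludes fixed > d_what, where A raises ValueError (negative product 'repeat'),
-- and d_what < 0, where A's value ([] or [1], from dict.fromkeys over an empty range)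
-- is an artefact of its implementation; B raises IndexError there.
def Pre_ev_coeffs (d_what : Int) (fixed : Int) : Prop := 0 ≤ d_what ∧ fixed ≤ d_what
instance (d_what : Int) (fixed : Int) : Decidable (Pre_ev_coeffs d_what fixed) := by
  unfold Pre_ev_coeffs; infer_instance

def pvWitness_ev_coeffs : Int × Int := (4, 2)

def Spec_ev_coeffs (d_what : Int) (fixed : Int) (out : List Int) : Prop :=
  out = ev_coeffs_alt d_what fixed
instance (d_what : Int) (fixed : Int) (out : List Int) : Decidable (Spec_ev_coeffs d_what fixed out) := by
  unfold Spec_ev_coeffs; infer_instance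

-- ===== CLAIM (what is proved, stated in full; the proofs are below) =====
def Claim_equal_ev_coeffs : Prop := ∀ (d_what : Int) (fixed : Int),
  Dom_ev_coeffs d_what fixed → Pre_ev_coeffs d_what fixed →
    Spec_ev_coeffs d_what fixed (ev_coeffs d_what fixed)


-- ===== LEMMAS AND PROOFS =====

-- Occupancy category of one die value: prefix value hit 0 / ≥1 times by free dice,
-- non-prefix value hit 0 / exactly 1 / ≥2 times.
inductive PvCat : Type
  | ca0 | ca1 | cb0 | cb1 | cb2
deriving DecidableEq

def pvBumpCat : PvCat → PvCat
  | .ca0 => .ca1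
  | .ca1 => .ca1
  | .cb0 => .cb1
  | .cb1 => .cb2
  | .cb2 => .cb2

def pvBump (st : Int → PvCat) (v : Int) : Int → PvCat :=
  fun w => if w = v then pvBumpCat (st w) else st w

def pvCa (vals : List Int) (st : Int → PvCat) (c : PvCat) : Nat :=
  vals.countP (fun v => decide (st v = c))

def pvScore (vals : List Int) (st : Int → PvCat) : Nat :=
  pvCa vals st .ca0 + pvCa vals st .cb1

def pvCnt (vals : List Int) (m : Nat) (st : Int → PvCat) (k : Int) : Int :=
  (((pvProdPow vals m).countP
      (fun x => (pvScore vals (x.foldl pvBump st) : Int) == k) : Nat) : Int)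

def pvU (p q : Int) : Nat → Int → Int → Int → Int → Int
  | 0, a0, _b0, b1, k => if k = a0 + b1 then 1 else 0
  | m + 1, a0, b0, b1, k =>
      a0 * (if 0 < a0 then pvU p q m (a0 - 1) b0 b1 k else 0)
      + b0 * (if 0 < b0 ∧ b1 < q then pvU p q m a0 (b0 - 1) (b1 + 1) k else 0)
      + b1 * (if 0 < b1 then pvU p q m a0 b0 (b1 - 1) k else 0)
      + (p - a0 + q - b0 - b1) * pvU p q m a0 b0 b1 k

def pvSt0 (fixed : Int) : Int → PvCat :=
  fun v => if v ≤ max fixed 0 then .ca0 else .cb0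

lemma pv_foldl_bump (x : List Int) : ∀ (st : Int → PvCat) (v : Int),
    (x.foldl pvBump st) v = pvBumpCat^[x.count v] (st v) := by
  
  induction x with
  | nil => intro st v; simp
  | cons h t ih =>
    intro st v
    simp only [List.foldl_cons, ih, List.count_cons]
    by_cases hv : v = h
    · subst hv
      simp [pvBump, Function.iterate_succ_apply]
    · have : (h == v) = false := by simp [Ne.symm hv]
      simp [pvBump, hv, this]

lemma pv_countP_bump {vals : List Int} (hnd : vals.Nodup) {v : Int} (hv : v ∈ vals)
    (st : Int → PvCat) (c : PvCat) :
    pvCa vals (pvBump st v) c + (if st v = c then 1 else 0)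
      = pvCa vals st c + (if pvBumpCat (st v) = c then 1 else 0) := by
  
  have hperm := List.perm_cons_erase hv
  unfold pvCa
  rw [hperm.countP_eq (p := fun w => decide (pvBump st v w = c)),
      hperm.countP_eq (p := fun w => decide (st w = c))]
  simp only [List.countP_cons]
  have hb : pvBump st v v = pvBumpCat (st v) := by simp [pvBump]
  have hrest : (vals.erase v).countP (fun w => decide (pvBump st v w = c))
      = (vals.erase v).countP (fun w => decide (st w = c)) := by
    apply List.countP_congr
    intro w hw
    have hne : w ≠ v := (hnd.mem_erase_iff.1 hw).1
    simp [pvBump, hne]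
  rw [hrest, hb]
  split_ifs <;> simp_all

lemma pv_sum_by_cat (F : PvCat → Int) (vals : List Int) (st : Int → PvCat) :
    (vals.map (fun v => F (st v))).sum
      = (pvCa vals st .ca0 : Int) * F .ca0 + (pvCa vals st .ca1 : Int) * F .ca1
      + (pvCa vals st .cb0 : Int) * F .cb0 + (pvCa vals st .cb1 : Int) * F .cb1
      + (pvCa vals st .cb2 : Int) * F .cb2 := by
  
  induction vals with
  | nil => simp [pvCa]
  | cons h t ih =>
    simp only [List.map_cons, List.sum_cons, ih, pvCa, List.countP_cons]
    cases st h <;> simp <;> ring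

def pvF (p q : Int) (m : Nat) (A0 B0 B1 : Int) (k : Int) : PvCat → Int
  | .ca0 => pvU p q m (A0 - 1) B0 B1 k
  | .ca1 => pvU p q m A0 B0 B1 k
  | .cb0 => pvU p q m A0 (B0 - 1) (B1 + 1) k
  | .cb1 => pvU p q m A0 B0 (B1 - 1) k
  | .cb2 => pvU p q m A0 B0 B1 k

lemma pv_cnt_eq_U (vals : List Int) (hnd : vals.Nodup) (P Q : Nat) :
    ∀ (m : Nat) (st : Int → PvCat) (k : Int),
      pvCa vals st .ca0 + pvCa vals st .ca1 = P →
      pvCa vals st .cb0 + pvCa vals st .cb1 + pvCa vals st .cb2 = Q →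
      pvCnt vals m st k
        = pvU (P : Int) (Q : Int) m (pvCa vals st .ca0 : Int)
            (pvCa vals st .cb0 : Int) (pvCa vals st .cb1 : Int) k := by
  
  intro m
  induction m with
  | zero =>
    intro st k _hA _hB
    unfold pvCnt
    rw [show pvProdPow vals 0 = [[]] from rfl]
    rw [show ([([] : List Int)].countP
        (fun x => (pvScore vals (x.foldl pvBump st) : Int) == k))
        = (if ((pvScore vals st : Int) == k) then 1 else 0) by
      simp [List.countP_cons]]
    unfold pvU pvScore
    split_ifs with h1 h2 h2 <;> simp_all <;> omega
  | succ m ih =>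
    intro st k hA hB
    have hflat : pvCnt vals (m + 1) st k
        = (vals.map (fun v => pvCnt vals m (pvBump st v) k)).sum := by
      unfold pvCnt
      rw [show pvProdPow vals (m + 1)
          = vals.flatMap (fun v => (pvProdPow vals m).map (fun t => v :: t)) from rfl]
      rw [List.countP_flatMap]
      rw [Nat.cast_list_sum, List.map_map]
      congr 1
      apply List.map_congr_left
      intro v _
      simp only [Function.comp_apply, List.countP_map]
      rfl
    rw [hflat]
    have hmap : ∀ v ∈ vals, pvCnt vals m (pvBump st v) k
        = pvF (P : Int) (Q : Int) m (pvCa vals st .ca0 : Int)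
            (pvCa vals st .cb0 : Int) (pvCa vals st .cb1 : Int) k (st v) := by
      intro v hv
      have e0 := pv_countP_bump hnd hv st PvCat.ca0
      have e1 := pv_countP_bump hnd hv st PvCat.ca1
      have e2 := pv_countP_bump hnd hv st PvCat.cb0
      have e3 := pv_countP_bump hnd hv st PvCat.cb1
      have e4 := pv_countP_bump hnd hv st PvCat.cb2
      have hpos : 1 ≤ pvCa vals st (st v) := by
        unfold pvCa
        rw [Nat.succ_le_iff, List.countP_pos_iff]
        exact ⟨v, hv, by simp⟩
      cases hsv : st v
      case ca0 =>
        rw [hsv] at e0 e1 e2 e3 e4 hpos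
        simp only [pvBumpCat, reduceCtorEq, reduceIte] at e0 e1 e2 e3 e4
        rw [ih (pvBump st v) k (by omega) (by omega)]
        rw [show ((pvCa vals (pvBump st v) PvCat.ca0 : Nat) : Int)
              = (pvCa vals st PvCat.ca0 : Int) - 1 by omega,
            show ((pvCa vals (pvBump st v) PvCat.cb0 : Nat) : Int)
              = (pvCa vals st PvCat.cb0 : Int) by omega,
            show ((pvCa vals (pvBump st v) PvCat.cb1 : Nat) : Int)
              = (pvCa vals st PvCat.cb1 : Int) by omega]
        rfl
      case ca1 =>
        rw [hsv] at e0 e1 e2 e3 e4 hpos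
        simp only [pvBumpCat, reduceCtorEq, reduceIte] at e0 e1 e2 e3 e4
        rw [ih (pvBump st v) k (by omega) (by omega)]
        rw [show ((pvCa vals (pvBump st v) PvCat.ca0 : Nat) : Int)
              = (pvCa vals st PvCat.ca0 : Int) by omega,
            show ((pvCa vals (pvBump st v) PvCat.cb0 : Nat) : Int)
              = (pvCa vals st PvCat.cb0 : Int) by omega,
            show ((pvCa vals (pvBump st v) PvCat.cb1 : Nat) : Int)
              = (pvCa vals st PvCat.cb1 : Int) by omega]
        rfl
      case cb0 =>
        rw [hsv] at e0 e1 e2 e3 e4 hpos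
        simp only [pvBumpCat, reduceCtorEq, reduceIte] at e0 e1 e2 e3 e4
        rw [ih (pvBump st v) k (by omega) (by omega)]
        rw [show ((pvCa vals (pvBump st v) PvCat.ca0 : Nat) : Int)
              = (pvCa vals st PvCat.ca0 : Int) by omega,
            show ((pvCa vals (pvBump st v) PvCat.cb0 : Nat) : Int)
              = (pvCa vals st PvCat.cb0 : Int) - 1 by omega,
            show ((pvCa vals (pvBump st v) PvCat.cb1 : Nat) : Int)
              = (pvCa vals st PvCat.cb1 : Int) + 1 by omega]
        rfl
      case cb1 =>
        rw [hsv] at e0 e1 e2 e3 e4 hpos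
        simp only [pvBumpCat, reduceCtorEq, reduceIte] at e0 e1 e2 e3 e4
        rw [ih (pvBump st v) k (by omega) (by omega)]
        rw [show ((pvCa vals (pvBump st v) PvCat.ca0 : Nat) : Int)
              = (pvCa vals st PvCat.ca0 : Int) by omega,
            show ((pvCa vals (pvBump st v) PvCat.cb0 : Nat) : Int)
              = (pvCa vals st PvCat.cb0 : Int) by omega,
            show ((pvCa vals (pvBump st v) PvCat.cb1 : Nat) : Int)
              = (pvCa vals st PvCat.cb1 : Int) - 1 by omega]
        rfl
      case cb2 =>
        rw [hsv] at e0 e1 e2 e3 e4 hpos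
        simp only [pvBumpCat, reduceCtorEq, reduceIte] at e0 e1 e2 e3 e4
        rw [ih (pvBump st v) k (by omega) (by omega)]
        rw [show ((pvCa vals (pvBump st v) PvCat.ca0 : Nat) : Int)
              = (pvCa vals st PvCat.ca0 : Int) by omega,
            show ((pvCa vals (pvBump st v) PvCat.cb0 : Nat) : Int)
              = (pvCa vals st PvCat.cb0 : Int) by omega,
            show ((pvCa vals (pvBump st v) PvCat.cb1 : Nat) : Int)
              = (pvCa vals st PvCat.cb1 : Int) by omega]
        rfl
    rw [List.map_congr_left hmap,
        pv_sum_by_cat (pvF (P : Int) (Q : Int) m (pvCa vals st .ca0 : Int)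
          (pvCa vals st .cb0 : Int) (pvCa vals st .cb1 : Int) k) vals st]
    simp only [pvF]
    rw [show pvU (P : Int) (Q : Int) (m + 1) (pvCa vals st .ca0 : Int)
          (pvCa vals st .cb0 : Int) (pvCa vals st .cb1 : Int) k
        = (pvCa vals st .ca0 : Int) *
            (if 0 < (pvCa vals st .ca0 : Int) then
              pvU (P : Int) (Q : Int) m ((pvCa vals st .ca0 : Int) - 1)
                (pvCa vals st .cb0 : Int) (pvCa vals st .cb1 : Int) k else 0)
          + (pvCa vals st .cb0 : Int) *
            (if 0 < (pvCa vals st .cb0 : Int) ∧ (pvCa vals st .cb1 : Int) < (Q : Int) then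
              pvU (P : Int) (Q : Int) m (pvCa vals st .ca0 : Int)
                ((pvCa vals st .cb0 : Int) - 1) ((pvCa vals st .cb1 : Int) + 1) k else 0)
          + (pvCa vals st .cb1 : Int) *
            (if 0 < (pvCa vals st .cb1 : Int) then
              pvU (P : Int) (Q : Int) m (pvCa vals st .ca0 : Int)
                (pvCa vals st .cb0 : Int) ((pvCa vals st .cb1 : Int) - 1) k else 0)
          + ((P : Int) - (pvCa vals st .ca0 : Int) + (Q : Int) - (pvCa vals st .cb0 : Int)
              - (pvCa vals st .cb1 : Int)) *
            pvU (P : Int) (Q : Int) m (pvCa vals st .ca0 : Int)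
              (pvCa vals st .cb0 : Int) (pvCa vals st .cb1 : Int) k from rfl]
    have r1 : ((pvCa vals st .ca0 : Nat) : Int) *
        (if 0 < (pvCa vals st .ca0 : Int) then
          pvU (P : Int) (Q : Int) m ((pvCa vals st .ca0 : Int) - 1)
            (pvCa vals st .cb0 : Int) (pvCa vals st .cb1 : Int) k else 0)
        = (pvCa vals st .ca0 : Int) *
          pvU (P : Int) (Q : Int) m ((pvCa vals st .ca0 : Int) - 1)
            (pvCa vals st .cb0 : Int) (pvCa vals st .cb1 : Int) k := by
      by_cases h : 0 < (pvCa vals st PvCat.ca0 : Int)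
      · rw [if_pos h]
      · have hz : ((pvCa vals st PvCat.ca0 : Nat) : Int) = 0 := by omega
        rw [hz]; ring
    have r2 : ((pvCa vals st .cb0 : Nat) : Int) *
        (if 0 < (pvCa vals st .cb0 : Int) ∧ (pvCa vals st .cb1 : Int) < (Q : Int) then
          pvU (P : Int) (Q : Int) m (pvCa vals st .ca0 : Int)
            ((pvCa vals st .cb0 : Int) - 1) ((pvCa vals st .cb1 : Int) + 1) k else 0)
        = (pvCa vals st .cb0 : Int) *
          pvU (P : Int) (Q : Int) m (pvCa vals st .ca0 : Int)
            ((pvCa vals st .cb0 : Int) - 1) ((pvCa vals st .cb1 : Int) + 1) k := by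
      by_cases h : 0 < (pvCa vals st PvCat.cb0 : Int)
      · rw [if_pos ⟨h, by omega⟩]
      · have hz : ((pvCa vals st PvCat.cb0 : Nat) : Int) = 0 := by omega
        rw [hz]; ring
    have r3 : ((pvCa vals st .cb1 : Nat) : Int) *
        (if 0 < (pvCa vals st .cb1 : Int) then
          pvU (P : Int) (Q : Int) m (pvCa vals st .ca0 : Int)
            (pvCa vals st .cb0 : Int) ((pvCa vals st .cb1 : Int) - 1) k else 0)
        = (pvCa vals st .cb1 : Int) *
          pvU (P : Int) (Q : Int) m (pvCa vals st .ca0 : Int)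
            (pvCa vals st .cb0 : Int) ((pvCa vals st .cb1 : Int) - 1) k := by
      by_cases h : 0 < (pvCa vals st PvCat.cb1 : Int)
      · rw [if_pos h]
      · have hz : ((pvCa vals st PvCat.cb1 : Nat) : Int) = 0 := by omega
        rw [hz]; ring
    rw [r1, r2, r3]
    have hconst : ((pvCa vals st .ca1 : Nat) : Int) + (pvCa vals st .cb2 : Int)
        = (P : Int) - (pvCa vals st .ca0 : Int) + (Q : Int) - (pvCa vals st .cb0 : Int)
          - (pvCa vals st .cb1 : Int) := by omega
    linear_combination hconst *
      pvU (P : Int) (Q : Int) m (pvCa vals st .ca0 : Int)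
        (pvCa vals st .cb0 : Int) (pvCa vals st .cb1 : Int) k

-- ---- A-side characterization ----

lemma pv_mem_prodPow (vals : List Int) :
    ∀ (m : Nat) (x : List Int), x ∈ pvProdPow vals m → ∀ e ∈ x, e ∈ vals := by
  
  intro m
  induction m with
  | zero => intro x hx e he; simp [pvProdPow] at hx; subst hx; simp at he
  | succ m ih =>
    intro x hx e he
    simp only [pvProdPow, List.mem_flatMap, List.mem_map] at hx
    obtain ⟨a, ha, t, ht, rfl⟩ := hx
    rcases List.mem_cons.1 he with rfl | he'
    · exact ha
    · exact ih t ht e he'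

lemma pv_countP_nodup_ext {u w : List Int} (hu : u.Nodup) (hw : w.Nodup)
    (p : Int → Bool) (h : ∀ v, p v = true → (v ∈ u ↔ v ∈ w)) :
    u.countP p = w.countP p := by
  
  rw [List.countP_eq_length_filter, List.countP_eq_length_filter]
  have hp : (u.filter p).Perm (w.filter p) := by
    rw [List.perm_ext_iff_of_nodup (hu.filter p) (hw.filter p)]
    intro a
    simp only [List.mem_filter]
    constructor
    · rintro ⟨ha, hpa⟩; exact ⟨(h a hpa).mp ha, hpa⟩
    · rintro ⟨ha, hpa⟩; exact ⟨(h a hpa).mpr ha, hpa⟩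
  exact hp.length_eq

lemma pv_countP_add_disjoint (p q : Int → Bool) (l : List Int)
    (h : ∀ v ∈ l, ¬(p v = true ∧ q v = true)) :
    l.countP p + l.countP q = l.countP (fun v => p v || q v) := by
  
  induction l with
  | nil => simp
  | cons a t ih =>
    simp only [List.countP_cons]
    have hd := h a (List.mem_cons_self ..)
    rw [← ih (fun v hv => h v (List.mem_cons_of_mem _ hv))]
    cases hp : p a <;> cases hq : q a <;> simp_all <;> omega

lemma pv_iter_ca1 (c : Nat) : pvBumpCat^[c] .ca1 = .ca1 := by
  
  induction c with
  | zero => rfl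
  | succ c ih => rw [Function.iterate_succ_apply]; exact ih

lemma pv_iter_cb2 (c : Nat) : pvBumpCat^[c] .cb2 = .cb2 := by
  
  induction c with
  | zero => rfl
  | succ c ih => rw [Function.iterate_succ_apply]; exact ih

lemma pv_iter_ca0 (c : Nat) : pvBumpCat^[c] .ca0 = if c = 0 then .ca0 else .ca1 := by
  
  cases c with
  | zero => rfl
  | succ c => rw [Function.iterate_succ_apply]; simp [pvBumpCat, pv_iter_ca1]

lemma pv_iter_cb1 (c : Nat) : pvBumpCat^[c] .cb1 = if c = 0 then .cb1 else .cb2 := by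
  
  cases c with
  | zero => rfl
  | succ c => rw [Function.iterate_succ_apply]; simp [pvBumpCat, pv_iter_cb2]

lemma pv_iter_cb0 (c : Nat) :
    pvBumpCat^[c] .cb0 = if c = 0 then .cb0 else if c = 1 then .cb1 else .cb2 := by
  
  cases c with
  | zero => rfl
  | succ c => rw [Function.iterate_succ_apply]; simp [pvBumpCat, pv_iter_cb1]

lemma pvSingles_eq (y : List Int) :
    pvSingles y = ((PySem.Set.ofList y).countP (fun v => (y.count v : Int) == 1) : Nat) := by
  
  unfold pvSingles
  rw [PySem.Dict.items_counter, List.filter_map]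
  have hfresh : (List.foldl (fun d nv => d.insert nv.1 nv.2) PySem.Dict.empty
      ((List.filter ((fun nv => nv.2 == 1) ∘ fun k => (k, (List.count k y : Int)))
        (PySem.Set.ofList y)).map (fun k => (k, (List.count k y : Int))))).items
      = PySem.Dict.empty.items ++
        ((List.filter ((fun nv => nv.2 == 1) ∘ fun k => (k, (List.count k y : Int)))
          (PySem.Set.ofList y)).map (fun k => (k, (List.count k y : Int)))).map
            (fun a => (a.1, a.2)) := by
    apply PySem.Dict.items_foldl_insert_fresh _ Prod.fst Prod.snd
    · intro a _
      exact PySem.Dict.contains_empty _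
    · rw [List.map_map]
      have : (Prod.fst ∘ fun k => (k, (List.count k y : Int))) = fun k => k := rfl
      rw [this, List.map_id']
      exact ((PySem.Set.nodup_ofList y).filter _)
  simp only [PySem.Dict.size, hfresh]
  have hempty : (PySem.Dict.empty : PySem.Dict Int Int).items = [] := rfl
  rw [hempty, List.nil_append, List.length_map, List.length_map,
      ← List.countP_eq_length_filter]
  rfl

lemma pv_outcome_score (d fixed : Int) (h0 : 0 ≤ d) (hf : fixed ≤ d)
    (x : List Int) (hx : x ∈ pvProdPow (PySem.List.pyRange 1 (d + 1) 1) (d - fixed).toNat) :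
    pvSingles (PySem.List.pyRange 1 (fixed + 1) 1 ++ x)
      = ((pvScore (PySem.List.pyRange 1 (d + 1) 1) (x.foldl pvBump (pvSt0 fixed)) : Nat) : Int) := by
  
  rw [pvSingles_eq]
  have hxv : ∀ e ∈ x, e ∈ PySem.List.pyRange 1 (d + 1) 1 := pv_mem_prodPow _ _ _ hx
  have hyv : ∀ e ∈ PySem.List.pyRange 1 (fixed + 1) 1 ++ x, e ∈ PySem.List.pyRange 1 (d + 1) 1 := by
    intro e he
    rcases List.mem_append.1 he with h | h
    · rw [PySem.List.mem_pyRange_one] at h ⊢; omega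
    · exact hxv e h
  rw [pv_countP_nodup_ext (PySem.Set.nodup_ofList _)
        (PySem.List.nodup_pyRange_one 1 (d + 1)) _ ?_]
  swap
  · intro v hp
    simp only [beq_iff_eq] at hp
    have hcnt : (PySem.List.pyRange 1 (fixed + 1) 1 ++ x).count v = 1 := by exact_mod_cast hp
    have hmem : v ∈ PySem.List.pyRange 1 (fixed + 1) 1 ++ x := by
      rw [← List.count_pos_iff]; omega
    constructor
    · intro _; exact hyv v hmem
    · intro _; exact (PySem.Set.mem_ofList _ _).2 hmem
  · -- countP vals (count == 1) = score
    have : ∀ kk : Nat, (kk : Int) = kk := fun _ => rfl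
    suffices h : (PySem.List.pyRange 1 (d + 1) 1).countP
        (fun v => (((PySem.List.pyRange 1 (fixed + 1) 1 ++ x).count v : Int)) == 1)
        = pvScore (PySem.List.pyRange 1 (d + 1) 1) (x.foldl pvBump (pvSt0 fixed)) by
      rw [h]
    unfold pvScore pvCa
    rw [pv_countP_add_disjoint _ _ _ ?_]
    swap
    · rintro v _ ⟨h1, h2⟩
      simp only [decide_eq_true_eq] at h1 h2
      rw [h1] at h2
      cases h2
    apply List.countP_congr
    intro v hv
    rw [PySem.List.mem_pyRange_one] at hv
    have hst := pv_foldl_bump x (pvSt0 fixed) v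
    have hcnt : (PySem.List.pyRange 1 (fixed + 1) 1 ++ x).count v
        = (if v ≤ max fixed 0 then 1 else 0) + x.count v := by
      rw [List.count_append]
      congr 1
      by_cases hvp : v ≤ max fixed 0
      · rw [if_pos hvp]
        exact List.count_eq_one_of_mem (PySem.List.nodup_pyRange_one _ _)
          (PySem.List.mem_pyRange_one.2 ⟨hv.1, by omega⟩)
      · rw [if_neg hvp, List.count_eq_zero.2]
        intro hmem
        rw [PySem.List.mem_pyRange_one] at hmem
        omega
    by_cases hvp : v ≤ max fixed 0
    · have hst0 : pvSt0 fixed v = PvCat.ca0 := by simp [pvSt0, hvp]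
      rw [hst0, pv_iter_ca0] at hst
      by_cases hc : x.count v = 0 <;>
        simp [hst, hc, hcnt, hvp]
    · have hst0 : pvSt0 fixed v = PvCat.cb0 := by simp [pvSt0, hvp]
      rw [hst0, pv_iter_cb0] at hst
      by_cases hc : x.count v = 0
      · simp [hst, hc, hcnt, hvp]
      · by_cases hc1 : x.count v = 1 <;>
          simp [hst, hc, hc1, hcnt, hvp]

-- ---- Dict plumbing for A's fromkeys / update / values ----

lemma pv_getD_foldl_pairs : ∀ (l : List (Int × Int)) (d : PySem.Dict Int Int) (k dflt : Int),
    (l.foldl (fun d kv => d.insert kv.1 kv.2) d).getD k dflt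
      = l.foldl (fun acc kv => if kv.1 = k then kv.2 else acc) (d.getD k dflt) := by
  
  intro l
  induction l with
  | nil => intro d k dflt; rfl
  | cons h t ih =>
    intro d k dflt
    simp only [List.foldl_cons, ih, PySem.Dict.getD_insert]
    congr 1
    split_ifs with h1 h2 h2 <;> first | rfl | (exact absurd h1.symm h2) | (exact absurd h2.symm h1)

lemma pv_pick_none (k : Int) : ∀ (l : List (Int × Int)) (z : Int),
    (∀ kv ∈ l, kv.1 ≠ k) →
    l.foldl (fun acc kv => if kv.1 = k then kv.2 else acc) z = z := by
  
  intro l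
  induction l with
  | nil => intro z _; rfl
  | cons h t ih =>
    intro z hl
    simp only [List.foldl_cons]
    rw [if_neg (hl h (List.mem_cons_self ..))]
    exact ih z (fun kv hkv => hl kv (List.mem_cons_of_mem _ hkv))

lemma pv_pick_map (f : Int → Int) (k : Int) : ∀ (s : List Int) (z : Int), s.Nodup →
    ((s.map (fun c => (c, f c))).foldl (fun acc kv => if kv.1 = k then kv.2 else acc) z)
      = if k ∈ s then f k else z := by
  
  intro s
  induction s with
  | nil => intro z _; simp
  | cons h t ih =>
    intro z hnd
    simp only [List.map_cons, List.foldl_cons]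
    by_cases hk : h = k
    · subst hk
      have hnm : h ∉ t := (List.nodup_cons.1 hnd).1
      rw [if_pos rfl]
      rw [pv_pick_none h (t.map (fun c => (c, f c))) (f h) ?_]
      · simp
      · intro kv hkv
        simp only [List.mem_map] at hkv
        obtain ⟨c, hc, rfl⟩ := hkv
        intro hch
        exact hnm (hch ▸ hc)
    · rw [if_neg hk, ih z (List.nodup_cons.1 hnd).2]
      have : (k ∈ h :: t) ↔ (k ∈ t) := by
        simp [List.mem_cons, Ne.symm hk]
      simp [this]

lemma pv_getD_fromkeys : ∀ (l : List Int) (d : PySem.Dict Int Int) (k dflt : Int),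
    (l.foldl (fun d k' => d.insert k' (0 : Int)) d).getD k dflt
      = if k ∈ l then 0 else d.getD k dflt := by
  
  intro l
  induction l with
  | nil => intro d k dflt; simp
  | cons h t ih =>
    intro d k dflt
    simp only [List.foldl_cons, ih, PySem.Dict.getD_insert]
    by_cases hk : k ∈ t
    · simp [hk]
    · by_cases hkh : k = h <;> simp [hk, hkh]

lemma pv_set_update_of_subset : ∀ (l : List Int) (s : PySem.Set Int),
    (∀ x ∈ l, x ∈ s) → PySem.Set.update s l = s := by
  
  intro l
  induction l with
  | nil => intro s _; rfl
  | cons h t ih =>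
    intro s hs
    unfold PySem.Set.update
    simp only [List.foldl_cons]
    rw [PySem.Set.add_of_mem (hs h (List.mem_cons_self ..))]
    exact ih s (fun x hx => hs x (List.mem_cons_of_mem _ hx))

lemma pv_evA_char (d fixed : Int) (h0 : 0 ≤ d) (hf : fixed ≤ d) :
    ev_coeffs d fixed
      = (PySem.List.pyRange 0 (d + 1) 1).map
          (fun kk => pvCnt (PySem.List.pyRange 1 (d + 1) 1) (d - fixed).toNat (pvSt0 fixed) kk) := by
  
  have hdisj : ∀ (st : Int → PvCat), ∀ v ∈ PySem.List.pyRange 1 (d + 1) 1,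
      ¬((fun v => decide (st v = PvCat.ca0)) v = true
        ∧ (fun v => decide (st v = PvCat.cb1)) v = true) := by
    rintro st v _ ⟨h1, h2⟩
    simp only [decide_eq_true_eq] at h1 h2
    rw [h1] at h2
    cases h2
  have hscore_le : ∀ (st : Int → PvCat),
      pvScore (PySem.List.pyRange 1 (d + 1) 1) st ≤ d.toNat := by
    intro st
    unfold pvScore pvCa
    rw [pv_countP_add_disjoint _ _ _ (hdisj st)]
    have h1 := List.countP_le_length
      (p := fun v => decide (st v = PvCat.ca0) || decide (st v = PvCat.cb1))
      (l := PySem.List.pyRange 1 (d + 1) 1)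
    rw [PySem.List.length_pyRange_one] at h1
    omega
  have hev : ev_coeffs d fixed
      = (List.foldl (fun (dd : PySem.Dict Int Int) kv => dd.insert kv.1 kv.2)
          (List.foldl (fun (dd : PySem.Dict Int Int) k => dd.insert k (0 : Int))
            PySem.Dict.empty (PySem.List.pyRange 0 (d + 1) 1))
          (PySem.Dict.counter ((ev_outcomes d fixed).map pvSingles)).items).values := rfl
  rw [hev]
  set cnts := (ev_outcomes d fixed).map pvSingles with hcnts
  set d0 := List.foldl (fun (dd : PySem.Dict Int Int) k => dd.insert k (0 : Int))
      PySem.Dict.empty (PySem.List.pyRange 0 (d + 1) 1) with hd0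
  set coeffs := List.foldl (fun (dd : PySem.Dict Int Int) kv => dd.insert kv.1 kv.2) d0
      (PySem.Dict.counter cnts).items with hcoeffs
  have hd0items : d0.items = (PySem.List.pyRange 0 (d + 1) 1).map (fun k => (k, (0 : Int))) := by
    rw [hd0]
    have h := PySem.Dict.items_foldl_insert_fresh (PySem.List.pyRange 0 (d + 1) 1)
      (fun x => x) (fun _ => (0 : Int)) PySem.Dict.empty
      (fun a _ => PySem.Dict.contains_empty a)
      (by simpa using PySem.List.nodup_pyRange_one 0 (d + 1))
    simpa using h
  have hd0keys : d0.keys = PySem.List.pyRange 0 (d + 1) 1 := by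
    rw [PySem.Dict.keys, hd0items, List.map_map]
    rw [show ((fun (x : Int × Int) => x.1) ∘ fun k => (k, (0 : Int))) = fun k => k from rfl,
        List.map_id']
  have hcbound : ∀ c ∈ cnts, (0 : Int) ≤ c ∧ c < d + 1 := by
    intro c hc
    rw [hcnts] at hc
    obtain ⟨y, hy, rfl⟩ := List.mem_map.1 hc
    have hy' : y ∈ (pvProdPow (PySem.List.pyRange 1 (d + 1) 1) (d - fixed).toNat).map
        (fun c => PySem.List.pyRange 1 (fixed + 1) 1 ++ c) := hy
    obtain ⟨x, hx, rfl⟩ := List.mem_map.1 hy'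
    rw [pv_outcome_score d fixed h0 hf x hx]
    have := hscore_le (x.foldl pvBump (pvSt0 fixed))
    omega
  have hknodup : coeffs.keys.Nodup := by
    rw [hcoeffs]
    exact PySem.Dict.nodup_keys_foldl_insert_key _ Prod.fst (fun _ kv => kv.2) d0
      (by rw [hd0keys]; exact PySem.List.nodup_pyRange_one 0 (d + 1))
  have hkeys : coeffs.keys = PySem.List.pyRange 0 (d + 1) 1 := by
    rw [hcoeffs]
    have h1 := PySem.Dict.keys_foldl_insert_key (PySem.Dict.counter cnts).items
      Prod.fst (fun _ kv => kv.2) d0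
    rw [h1, hd0keys, pv_set_update_of_subset]
    intro xk hxk
    rw [PySem.Dict.items_counter, List.map_map] at hxk
    have hxk' : xk ∈ PySem.Set.ofList cnts := by simpa using hxk
    have := hcbound xk ((PySem.Set.mem_ofList _ _).1 hxk')
    rw [PySem.List.mem_pyRange_one]
    omega
  rw [PySem.Dict.values_eq_map_keys coeffs hknodup 0, hkeys]
  apply List.map_congr_left
  intro kk _
  rw [hcoeffs, pv_getD_foldl_pairs, hd0, pv_getD_fromkeys]
  have hstart : (if kk ∈ PySem.List.pyRange 0 (d + 1) 1 then (0 : Int)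
      else PySem.Dict.empty.getD kk 0) = 0 := by
    by_cases hm : kk ∈ PySem.List.pyRange 0 (d + 1) 1
    · rw [if_pos hm]
    · rw [if_neg hm]
      exact PySem.Dict.getD_empty kk 0
  rw [hstart, PySem.Dict.items_counter,
      pv_pick_map (fun c => (List.count c cnts : Int)) kk (PySem.Set.ofList cnts) 0
        (PySem.Set.nodup_ofList cnts)]
  have hpick : (if kk ∈ PySem.Set.ofList cnts then (List.count kk cnts : Int) else 0)
      = (List.count kk cnts : Int) := by
    split_ifs with hm
    · rfl
    · have hnm : kk ∉ cnts := fun hin => hm ((PySem.Set.mem_ofList _ _).2 hin)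
      simp [List.count_eq_zero.2 hnm]
  rw [hpick, hcnts, List.count_eq_countP, List.countP_map]
  have hout : ev_outcomes d fixed
      = (pvProdPow (PySem.List.pyRange 1 (d + 1) 1) (d - fixed).toNat).map
          (fun c => PySem.List.pyRange 1 (fixed + 1) 1 ++ c) := rfl
  rw [hout, List.countP_map]
  unfold pvCnt
  congr 1
  apply List.countP_congr
  intro x hx
  have hsc := pv_outcome_score d fixed h0 hf x hx
  simp only [Function.comp_apply]
  rw [hsc]

lemma pv_ca_st0 (d fixed : Int) (h0 : 0 ≤ d) (hf : fixed ≤ d) :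
    pvCa (PySem.List.pyRange 1 (d + 1) 1) (pvSt0 fixed) .ca0 = (max fixed 0).toNat
    ∧ pvCa (PySem.List.pyRange 1 (d + 1) 1) (pvSt0 fixed) .ca1 = 0
    ∧ pvCa (PySem.List.pyRange 1 (d + 1) 1) (pvSt0 fixed) .cb0
        = d.toNat - (max fixed 0).toNat
    ∧ pvCa (PySem.List.pyRange 1 (d + 1) 1) (pvSt0 fixed) .cb1 = 0
    ∧ pvCa (PySem.List.pyRange 1 (d + 1) 1) (pvSt0 fixed) .cb2 = 0 := by
  
  have hsplit : PySem.List.pyRange 1 (d + 1) 1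
      = PySem.List.pyRange 1 (max fixed 0 + 1) 1 ++ PySem.List.pyRange (max fixed 0 + 1) (d + 1) 1 :=
    PySem.List.pyRange_one_append _ _ _ (by omega) (by omega)
  have hL : ∀ c : PvCat, (PySem.List.pyRange 1 (max fixed 0 + 1) 1).countP
      (fun v => decide (pvSt0 fixed v = c))
      = if PvCat.ca0 = c then (max fixed 0).toNat else 0 := by
    intro c
    rw [List.countP_congr (q := fun _ => decide (PvCat.ca0 = c)) ?_]
    · by_cases hc : PvCat.ca0 = c
      · simp [hc, PySem.List.length_pyRange_one]
      · simp [hc]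
    · intro v hv
      rw [PySem.List.mem_pyRange_one] at hv
      simp [pvSt0, show v ≤ max fixed 0 by omega]
  have hR : ∀ c : PvCat, (PySem.List.pyRange (max fixed 0 + 1) (d + 1) 1).countP
      (fun v => decide (pvSt0 fixed v = c))
      = if PvCat.cb0 = c then d.toNat - (max fixed 0).toNat else 0 := by
    intro c
    rw [List.countP_congr (q := fun _ => decide (PvCat.cb0 = c)) ?_]
    · by_cases hc : PvCat.cb0 = c
      · simp [hc, PySem.List.length_pyRange_one]
        omega
      · simp [hc]
    · intro v hv
      rw [PySem.List.mem_pyRange_one] at hv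
      simp [pvSt0, show ¬ (v ≤ max fixed 0) by omega]
  refine ⟨?_, ?_, ?_, ?_, ?_⟩ <;>
    (unfold pvCa; rw [hsplit, List.countP_append, hL, hR]) <;> simp

-- ---- B-side characterization ----

lemma pv_foldl_const_step {alpha beta : Type} (g : alpha → alpha) :
    ∀ (l : List beta) (x : alpha), l.foldl (fun acc _ => g acc) x = g^[l.length] x := by
  
  intro l
  induction l with
  | nil => intro x; rfl
  | cons h t ih =>
    intro x
    simp only [List.foldl_cons, List.length_cons, ih, Function.iterate_succ_apply]

lemma pv_layer_char (p q n : Int) (_hp : 0 ≤ p) (_hq : 0 ≤ q) :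
    ∀ (i : Nat) (a0 b0 b1 : Int), 0 ≤ a0 → a0 ≤ p → 0 ≤ b0 → b0 ≤ q → 0 ≤ b1 → b1 ≤ q →
      PySem.List.pyGetD
          (PySem.List.pyGetD
            (PySem.List.pyGetD ((pvStep p q n)^[i] (pvLayer0 p q n)) a0 []) b0 []) b1 []
        = (PySem.List.pyRange 0 n 1).map (fun k => pvU p q i a0 b0 b1 k) := by
  
  intro i
  induction i with
  | zero =>
    intro a0 b0 b1 ha0 ha0' hb0 hb0' hb1 hb1'
    unfold pvLayer0
    rw [Function.iterate_zero_apply,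
        PySem.List.pyGetD_map_pyRange_of_nonneg _ _ _ _ ha0 (by omega),
        PySem.List.pyGetD_map_pyRange_of_nonneg _ _ _ _ hb0 (by omega),
        PySem.List.pyGetD_map_pyRange_of_nonneg _ _ _ _ hb1 (by omega)]
    apply List.map_congr_left
    intro k _
    simp [pvU]
  | succ i ih =>
    intro a0 b0 b1 ha0 ha0' hb0 hb0' hb1 hb1'
    rw [Function.iterate_succ_apply']
    rw [pvStep]
    rw [PySem.List.pyGetD_map_pyRange_of_nonneg _ _ _ _ ha0 (by omega),
        PySem.List.pyGetD_map_pyRange_of_nonneg _ _ _ _ hb0 (by omega),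
        PySem.List.pyGetD_map_pyRange_of_nonneg _ _ _ _ hb1 (by omega)]
    apply List.map_congr_left
    intro k hk
    rw [PySem.List.mem_pyRange_one] at hk
    have t1 : (if 0 < a0 then pvG ((pvStep p q n)^[i] (pvLayer0 p q n)) (a0 - 1) b0 b1 k else 0)
        = (if 0 < a0 then pvU p q i (a0 - 1) b0 b1 k else 0) := by
      split_ifs with hg
      · unfold pvG
        rw [ih (a0 - 1) b0 b1 (by omega) (by omega) hb0 hb0' hb1 hb1',
            PySem.List.pyGetD_map_pyRange_of_nonneg _ _ _ _ hk.1 hk.2]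
      · rfl
    have t2 : (if 0 < b0 ∧ b1 < q then pvG ((pvStep p q n)^[i] (pvLayer0 p q n)) a0 (b0 - 1) (b1 + 1) k else 0)
        = (if 0 < b0 ∧ b1 < q then pvU p q i a0 (b0 - 1) (b1 + 1) k else 0) := by
      split_ifs with hg
      · unfold pvG
        rw [ih a0 (b0 - 1) (b1 + 1) ha0 ha0' (by omega) (by omega) (by omega) (by omega),
            PySem.List.pyGetD_map_pyRange_of_nonneg _ _ _ _ hk.1 hk.2]
      · rfl
    have t3 : (if 0 < b1 then pvG ((pvStep p q n)^[i] (pvLayer0 p q n)) a0 b0 (b1 - 1) k else 0)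
        = (if 0 < b1 then pvU p q i a0 b0 (b1 - 1) k else 0) := by
      split_ifs with hg
      · unfold pvG
        rw [ih a0 b0 (b1 - 1) ha0 ha0' hb0 hb0' (by omega) (by omega),
            PySem.List.pyGetD_map_pyRange_of_nonneg _ _ _ _ hk.1 hk.2]
      · rfl
    have t4 : pvG ((pvStep p q n)^[i] (pvLayer0 p q n)) a0 b0 b1 k = pvU p q i a0 b0 b1 k := by
      unfold pvG
      rw [ih a0 b0 b1 ha0 ha0' hb0 hb0' hb1 hb1',
          PySem.List.pyGetD_map_pyRange_of_nonneg _ _ _ _ hk.1 hk.2]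
    rw [t1, t2, t3, t4]
    rfl

lemma pv_evB_char (d fixed : Int) (h0 : 0 ≤ d) (hf : fixed ≤ d) :
    ev_coeffs_alt d fixed
      = (PySem.List.pyRange 0 (d + 1) 1).map
          (fun k => pvU (max fixed 0) (d - max fixed 0) (d - fixed).toNat
            (max fixed 0) (d - max fixed 0) 0 k) := by
  
  rw [show ev_coeffs_alt d fixed
      = PySem.List.pyGetD (PySem.List.pyGetD (PySem.List.pyGetD
          ((PySem.List.pyRange 0 (d - fixed) 1).foldl
            (fun prev _ => pvStep (max fixed 0) (d - max fixed 0) (d + 1) prev)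
            (pvLayer0 (max fixed 0) (d - max fixed 0) (d + 1)))
          (max fixed 0) []) (d - max fixed 0) []) 0 [] from rfl]
  rw [pv_foldl_const_step, PySem.List.length_pyRange_one,
      show (d - fixed - 0 : Int) = d - fixed by ring]
  have h := pv_layer_char (max fixed 0) (d - max fixed 0) (d + 1)
    (by omega) (by omega) ((d - fixed).toNat) (max fixed 0) (d - max fixed 0) 0
    (by omega) (by omega) (by omega) (by omega) (by omega) (by omega)
  exact h


-- ===== VERDICT (by name: the statement is the Claim_ definition above) =====
theorem ev_coeffs_spec : Claim_equal_ev_coeffs := by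
  intro d fixed _hdom hpre
  obtain ⟨h0, hf⟩ := hpre
  unfold Spec_ev_coeffs
  rw [pv_evA_char d fixed h0 hf, pv_evB_char d fixed h0 hf]
  apply List.map_congr_left
  intro kk _
  obtain ⟨hA0, hA1, hB0, hB1, hB2⟩ := pv_ca_st0 d fixed h0 hf
  rw [pv_cnt_eq_U (PySem.List.pyRange 1 (d + 1) 1) (PySem.List.nodup_pyRange_one 1 (d + 1))
        (max fixed 0).toNat (d.toNat - (max fixed 0).toNat) (d - fixed).toNat (pvSt0 fixed) kk
        (by omega) (by omega)]
  rw [hA0, hB0, hB1]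
  have e1 : (((max fixed 0).toNat : Int)) = max fixed 0 := by omega
  have e2 : ((d.toNat - (max fixed 0).toNat : Nat) : Int) = d - max fixed 0 := by omega
  rw [e1, e2]
  norm_num
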